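-- pv_equiv track=rewrite | github.com/ghanshyam20/speed-checker | gui.py | typingErrors
-- ===== SOURCE A (Python) =====
-- def typingErrors(prompt, input_words):
--     words = prompt.split()
--     errors = 0
--
--     for i in range(len(words)):
--         if i in (0, len(words)-1):
--             if words[i] == input_words[i]:
--                 continue
--             else:
--                 errors += 1
--         else:
--             if words[i] == input_words[i]:
--                 if (words[i+1] == input_words[i+1]) and (words[i-1] == input_words[i-1]):
--                     continue
--                 else:
--                     errors += 1
--             else:
--                 errors += 1
--     return errors
-- ===== SOURCE B (Python) =====
-- def typingErrors(prompt, input_words):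
--     # Inverted strategy: instead of testing each position's window, each mismatch
--     # marks the set of positions it invalidates (itself, plus adjacent interior
--     # positions); the answer is the size of that set.
--     words = prompt.split()
--     n = len(words)
--     bad = set()
--     for j in range(n):
--         if words[j] != input_words[j]:
--             bad.add(j)
--             if 1 <= j - 1 <= n - 2:
--                 bad.add(j - 1)
--             if 1 <= j + 1 <= n - 2:
--                 bad.add(j + 1)
--     return len(bad)
-- ===== Notes on version B (the rewrite author's own statement) =====
-- stated objective: alternative
-- what changed: Inverts the direction of the check: instead of A's per-position pass that re-examines the neighbor window at every index, B scans once for mismatches and lets each mismatch mark the set of positions it invalidates (itself plus adjacent interior indices), returning the size of that marked set.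
import Mathlib
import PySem

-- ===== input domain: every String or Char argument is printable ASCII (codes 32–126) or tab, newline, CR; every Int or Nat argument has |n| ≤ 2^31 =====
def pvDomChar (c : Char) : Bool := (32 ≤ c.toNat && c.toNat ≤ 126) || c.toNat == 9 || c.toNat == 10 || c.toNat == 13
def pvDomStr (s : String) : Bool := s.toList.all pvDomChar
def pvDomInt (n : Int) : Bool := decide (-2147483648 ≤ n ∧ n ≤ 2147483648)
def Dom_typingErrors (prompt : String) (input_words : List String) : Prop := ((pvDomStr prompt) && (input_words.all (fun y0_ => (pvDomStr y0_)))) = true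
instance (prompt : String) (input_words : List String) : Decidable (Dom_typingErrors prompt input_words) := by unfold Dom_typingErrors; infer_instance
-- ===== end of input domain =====

-- B inverts the check: instead of A's per-position neighbor-window test, each mismatch marks the
-- positions it invalidates in a set and the answer is that set's size (objective: alternative).

-- ===== PORT A =====
-- A: one pass over range(len(words)); boundary indices check only their own word,
-- interior indices re-compare both neighbors. xs[i] under Pre_ is PySem.List.pyGetD.
def typingErrors (prompt : String) (input_words : List String) : Int :=
  let words := PySem.Str.split₀ prompt
  let n := words.length
  (PySem.List.pyRange 0 n 1).foldl (fun errors i =>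
    if i = 0 ∨ i = (n : Int) - 1 then
      if PySem.List.pyGetD words i "" = PySem.List.pyGetD input_words i "" then errors
      else errors + 1
    else
      if PySem.List.pyGetD words i "" = PySem.List.pyGetD input_words i "" then
        if PySem.List.pyGetD words (i+1) "" = PySem.List.pyGetD input_words (i+1) "" ∧
           PySem.List.pyGetD words (i-1) "" = PySem.List.pyGetD input_words (i-1) "" then errors
        else errors + 1
      else errors + 1) 0

-- ===== PORT B =====
-- B: loop body — a mismatch at j marks j, and marks j-1 / j+1 when those are interior indices.
def badStep (words input_words : List String) (n : Nat) (bad : PySem.Set Int) (j : Int) : PySem.Set Int :=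
  if ¬ (PySem.List.pyGetD words j "" = PySem.List.pyGetD input_words j "") then
    let bad := PySem.Set.add bad j
    let bad := if (1 : Int) ≤ j - 1 ∧ j - 1 ≤ (n : Int) - 2 then PySem.Set.add bad (j - 1) else bad
    if (1 : Int) ≤ j + 1 ∧ j + 1 ≤ (n : Int) - 2 then PySem.Set.add bad (j + 1) else bad
  else bad

-- B: scan once for mismatches, accumulate the marked-position set, return its size.
def typingErrors_alt (prompt : String) (input_words : List String) : Int :=
  let words := PySem.Str.split₀ prompt
  let n := words.length
  let bad := (PySem.List.pyRange 0 n 1).foldl (badStep words input_words n) PySem.Set.empty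
  PySem.Set.len bad

-- ===== PRECONDITION & SPEC =====
-- Pre_ excludes exactly the inputs where Python A raises IndexError:
-- input_words shorter than prompt.split() (B raises the same IndexError there).
def Pre_typingErrors (prompt : String) (input_words : List String) : Prop :=
  (PySem.Str.split₀ prompt).length ≤ input_words.length
instance (prompt : String) (input_words : List String) : Decidable (Pre_typingErrors prompt input_words) := by unfold Pre_typingErrors; infer_instance

def pvWitness_typingErrors : String × List String := ("ab cd ef", ["ab", "xx", "ef"])

def Spec_typingErrors (prompt : String) (input_words : List String) (out : Int) : Prop := out = typingErrors_alt prompt input_words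
instance (prompt : String) (input_words : List String) (out : Int) : Decidable (Spec_typingErrors prompt input_words out) := by unfold Spec_typingErrors; infer_instance

-- ===== CLAIM (what is proved, stated in full; the proofs are below) =====
def Claim_equal_typingErrors : Prop := ∀ (prompt : String) (input_words : List String), Dom_typingErrors prompt input_words → Pre_typingErrors prompt input_words → Spec_typingErrors prompt input_words (typingErrors prompt input_words)

-- ===== LEMMAS AND PROOFS =====

-- mismatch flag at index i
def mismB (w iw : List String) (i : Int) : Bool :=
  ¬ (PySem.List.pyGetD w i "" = PySem.List.pyGetD iw i "")

-- A's per-position error predicate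
def perrB (w iw : List String) (n : Nat) (i : Int) : Bool :=
  if i = 0 ∨ i = (n : Int) - 1 then mismB w iw i
  else (mismB w iw i || mismB w iw (i + 1) || mismB w iw (i - 1))

-- during B's loop, iteration j marks position x
def addedAt (w iw : List String) (n : Nat) (j x : Int) : Bool :=
  mismB w iw j &&
    (x == j ||
     (x == j - 1 && decide ((1 : Int) ≤ j - 1 ∧ j - 1 ≤ (n : Int) - 2)) ||
     (x == j + 1 && decide ((1 : Int) ≤ j + 1 ∧ j + 1 ≤ (n : Int) - 2)))

-- counting fold = countP
theorem foldl_ite_count (c : Int → Bool) (l : List Int) (init : Int) :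
    l.foldl (fun e i => if c i then e + 1 else e) init = init + (l.countP c : Int) := by
  induction l generalizing init with
  | nil => simp
  | cons a t ih =>
      simp only [List.foldl_cons, List.countP_cons, ih]
      by_cases h : c a = true
      · simp [h]; ring
      · simp [h]

-- A's nested-if body is the simple counting body over perrB
theorem bodyA_eq (w iw : List String) :
    (fun (errors : Int) (i : Int) =>
      if i = 0 ∨ i = (w.length : Int) - 1 then
        if PySem.List.pyGetD w i "" = PySem.List.pyGetD iw i "" then errors else errors + 1
      else
        if PySem.List.pyGetD w i "" = PySem.List.pyGetD iw i "" then
          if PySem.List.pyGetD w (i+1) "" = PySem.List.pyGetD iw (i+1) "" ∧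
             PySem.List.pyGetD w (i-1) "" = PySem.List.pyGetD iw (i-1) "" then errors
          else errors + 1
        else errors + 1)
    = (fun (errors : Int) (i : Int) => if perrB w iw w.length i then errors + 1 else errors) := by
  funext e i
  simp only [perrB, mismB]
  split_ifs <;> simp_all

theorem mem_badStep (w iw : List String) (n : Nat) (s : PySem.Set Int) (j x : Int) :
    x ∈ badStep w iw n s j ↔ x ∈ s ∨ addedAt w iw n j x = true := by
  simp only [badStep, addedAt, mismB]
  split_ifs with h h1 h2 h3 <;>
    (simp only [PySem.Set.mem_add, Bool.and_eq_true, Bool.or_eq_true, beq_iff_eq,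
       decide_eq_true_iff]; tauto)

theorem mem_fold_badStep (w iw : List String) (n : Nat) (x : Int) :
    ∀ (k : Nat) (a : Int) (s : PySem.Set Int), ((n : Int) - a).toNat = k →
      (x ∈ (PySem.List.pyRange a n 1).foldl (badStep w iw n) s ↔
        x ∈ s ∨ ∃ j, j ∈ PySem.List.pyRange a n 1 ∧ addedAt w iw n j x = true) := by
  intro k
  induction k with
  | zero =>
      intro a s hk
      have ha : (n : Int) ≤ a := by omega
      simp [PySem.List.pyRange_one_eq_nil ha]
  | succ k ih =>
      intro a s hk
      have ha : a < (n : Int) := by omega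
      rw [PySem.List.pyRange_one_cons ha]
      simp only [List.foldl_cons, List.mem_cons]
      rw [ih (a + 1) (badStep w iw n s a) (by omega)]
      rw [mem_badStep]
      constructor
      · rintro ((hs | hadd) | ⟨j, hj, haj⟩)
        · exact Or.inl hs
        · exact Or.inr ⟨a, Or.inl rfl, hadd⟩
        · exact Or.inr ⟨j, Or.inr hj, haj⟩
      · rintro (hs | ⟨j, (rfl | hj), haj⟩)
        · exact Or.inl (Or.inl hs)
        · exact Or.inl (Or.inr haj)
        · exact Or.inr ⟨j, hj, haj⟩

theorem nodup_fold_badStep (w iw : List String) (n : Nat) :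
    ∀ (l : List Int) (s : PySem.Set Int), s.Nodup →
      ((l.foldl (badStep w iw n) s : PySem.Set Int)).Nodup := by
  intro l
  induction l with
  | nil => intro s hs; simpa using hs
  | cons a t ih =>
      intro s hs
      simp only [List.foldl_cons]
      apply ih
      simp only [badStep]
      split_ifs <;> first
        | exact hs
        | exact PySem.Set.nodup_add _ _ hs
        | exact PySem.Set.nodup_add _ _ (PySem.Set.nodup_add _ _ hs)
        | exact PySem.Set.nodup_add _ _ (PySem.Set.nodup_add _ _ (PySem.Set.nodup_add _ _ hs))

-- a position is marked by some iteration iff it is in range and A's predicate holds there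
theorem addedAt_iff_perrB (w iw : List String) (n : Nat) (x : Int) :
    (∃ j, j ∈ PySem.List.pyRange 0 n 1 ∧ addedAt w iw n j x = true) ↔
      ((0 : Int) ≤ x ∧ x < (n : Int) ∧ perrB w iw n x = true) := by
  constructor
  · rintro ⟨j, hj, haj⟩
    have hjr : (0 : Int) ≤ j ∧ j < (n : Int) := PySem.List.mem_pyRange_one.mp hj
    simp only [addedAt, Bool.and_eq_true, Bool.or_eq_true, beq_iff_eq,
      decide_eq_true_iff] at haj
    obtain ⟨hm, hcase⟩ := haj
    rcases hcase with ((rfl | ⟨rfl, hb⟩) | ⟨rfl, hb⟩)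
    · refine ⟨hjr.1, hjr.2, ?_⟩
      simp only [perrB]
      split_ifs <;> simp [hm]
    · refine ⟨by omega, by omega, ?_⟩
      simp only [perrB]
      have : ¬ (j - 1 = 0 ∨ j - 1 = (n : Int) - 1) := by omega
      rw [if_neg this]
      simp only [Bool.or_eq_true]
      left; right
      simpa using hm
    · refine ⟨by omega, by omega, ?_⟩
      simp only [perrB]
      have : ¬ (j + 1 = 0 ∨ j + 1 = (n : Int) - 1) := by omega
      rw [if_neg this]
      simp only [Bool.or_eq_true]
      right
      simpa using hm
  · rintro ⟨h0, hn, hp⟩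
    simp only [perrB] at hp
    by_cases hb : x = 0 ∨ x = (n : Int) - 1
    · rw [if_pos hb] at hp
      exact ⟨x, PySem.List.mem_pyRange_one.mpr ⟨h0, hn⟩, by simp [addedAt, hp]⟩
    · rw [if_neg hb] at hp
      simp only [Bool.or_eq_true] at hp
      rcases hp with (hm | hm) | hm
      · exact ⟨x, PySem.List.mem_pyRange_one.mpr ⟨h0, hn⟩, by simp [addedAt, hm]⟩
      · refine ⟨x + 1, PySem.List.mem_pyRange_one.mpr ⟨by omega, by omega⟩, ?_⟩
        simp only [addedAt, Bool.and_eq_true, Bool.or_eq_true, beq_iff_eq,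
          decide_eq_true_iff]
        exact ⟨hm, Or.inl (Or.inr ⟨by ring, by omega, by omega⟩)⟩
      · refine ⟨x - 1, PySem.List.mem_pyRange_one.mpr ⟨by omega, by omega⟩, ?_⟩
        simp only [addedAt, Bool.and_eq_true, Bool.or_eq_true, beq_iff_eq,
          decide_eq_true_iff]
        exact ⟨hm, Or.inr ⟨by ring, by omega, by omega⟩⟩

-- B's marked set is a permutation of the filtered range, so its size is the countP
theorem alt_eq_countP (w iw : List String) :
    PySem.Set.len ((PySem.List.pyRange 0 w.length 1).foldl (badStep w iw w.length) PySem.Set.empty)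
      = (((PySem.List.pyRange 0 (w.length : Nat) 1).countP (perrB w iw w.length) : Nat) : Int) := by
  set n := w.length
  set bad := (PySem.List.pyRange 0 n 1).foldl (badStep w iw n) PySem.Set.empty with hbad
  have hnodup : (bad : List Int).Nodup :=
    nodup_fold_badStep w iw n _ PySem.Set.empty (by simp [PySem.Set.empty])
  have hmem : ∀ x : Int, x ∈ (bad : List Int) ↔
      x ∈ (PySem.List.pyRange 0 n 1).filter (perrB w iw n) := by
    intro x
    rw [hbad, mem_fold_badStep w iw n x (((n : Int) - 0).toNat) 0 PySem.Set.empty rfl]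
    simp only [PySem.Set.empty, List.not_mem_nil, false_or]
    rw [addedAt_iff_perrB, List.mem_filter, PySem.List.mem_pyRange_one]
    tauto
  have hperm : (bad : List Int).Perm ((PySem.List.pyRange 0 n 1).filter (perrB w iw n)) := by
    apply List.perm_ext_iff_of_nodup hnodup (List.Nodup.filter _ (PySem.List.nodup_pyRange_one 0 n)) |>.mpr
    exact hmem
  have hlen := hperm.length_eq
  rw [List.countP_eq_length_filter]
  simp [PySem.Set.len, hlen]

-- ===== VERDICT (by name: the statement is the Claim_ definition above) =====
theorem typingErrors_spec : Claim_equal_typingErrors := by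
  intro prompt input_words _ _
  unfold Spec_typingErrors typingErrors typingErrors_alt
  simp only []
  rw [bodyA_eq (PySem.Str.split₀ prompt) input_words,
      foldl_ite_count, alt_eq_countP]
  simp
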